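-- pv_equiv track=rewrite | github.com/tnshgarg/jarvis-mark1-revised | src/mark1/scanning/ast_analyzer.py | _calculate_quality_metrics_regex
-- ===== SOURCE A (Python) =====
-- from typing import Dict, List, Optional, Any, Set, Union, Tuple
--
-- def _calculate_quality_metrics_regex(content: str) -> Dict[str, Any]:
--     """Calculate basic quality metrics"""
--     lines = content.split('\n')
--
--     return {
--         'total_lines': len(lines),
--         'code_lines': len([line for line in lines if line.strip() and not line.strip().startswith('//')]),
--         'comment_lines': len([line for line in lines if line.strip().startswith('//')]),
--         'empty_lines': len([line for line in lines if not line.strip()])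
--     }
-- ===== SOURCE B (Python) =====
-- def _calculate_quality_metrics_regex(content: str):
--     """Single-pass line classification with explicit counters."""
--     lines = content.split('\n')
--     code = comment = empty = 0
--     for line in lines:
--         s = line.strip()
--         if not s:
--             empty += 1
--         elif s.startswith('//'):
--             comment += 1
--         else:
--             code += 1
--     return {
--         'total_lines': len(lines),
--         'code_lines': code,
--         'comment_lines': comment,
--         'empty_lines': empty,
--     }
-- ===== Notes on version B (the rewrite author's own statement) =====
-- stated objective: simpler
-- what changed: Replaces four independent list-comprehension scans with one fused loop over the lines maintaining three explicit counters (empty/comment/code via if/elif/else).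
import Mathlib
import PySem

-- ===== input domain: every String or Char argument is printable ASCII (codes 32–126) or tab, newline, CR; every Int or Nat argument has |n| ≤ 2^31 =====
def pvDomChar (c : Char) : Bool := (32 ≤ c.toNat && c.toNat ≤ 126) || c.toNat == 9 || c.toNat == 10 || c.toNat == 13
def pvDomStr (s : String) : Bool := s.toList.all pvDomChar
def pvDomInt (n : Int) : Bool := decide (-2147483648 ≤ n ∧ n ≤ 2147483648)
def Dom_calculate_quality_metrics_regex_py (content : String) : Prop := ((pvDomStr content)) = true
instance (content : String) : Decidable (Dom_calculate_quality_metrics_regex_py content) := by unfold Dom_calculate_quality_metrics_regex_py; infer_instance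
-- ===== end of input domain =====

-- B replaces A's four independent filtering scans by one fused loop with three counters (simpler, one pass).

-- ===== PORT A =====
def calculate_quality_metrics_regex_py (content : String) : List (String × Int) :=
  let lines := (PySem.Chars.splitOn content.toList ['\n']).map String.mk
  [("total_lines", (lines.length : Int)),
   ("code_lines", ((lines.filter (fun line =>
      !(PySem.Str.strip line == "") && !PySem.Str.startswith (PySem.Str.strip line) "//")).length : Int)),
   ("comment_lines", ((lines.filter (fun line =>
      PySem.Str.startswith (PySem.Str.strip line) "//")).length : Int)),
   ("empty_lines", ((lines.filter (fun line =>
      PySem.Str.strip line == "")).length : Int))]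

-- ===== PORT B =====
-- the single fused loop of Source B: three accumulators, if/elif/else
def pvAltLoop : List String → Int × Int × Int → Int × Int × Int
  | [], acc => acc
  | line :: rest, (code, comment, empty) =>
      let s := PySem.Str.strip line
      if s == "" then pvAltLoop rest (code, comment, empty + 1)
      else if PySem.Str.startswith s "//" then pvAltLoop rest (code, comment + 1, empty)
      else pvAltLoop rest (code + 1, comment, empty)

def calculate_quality_metrics_regex_py_alt (content : String) : List (String × Int) :=
  let lines := (PySem.Chars.splitOn content.toList ['\n']).map String.mk
  let res := pvAltLoop lines (0, 0, 0)
  [("total_lines", (lines.length : Int)),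
   ("code_lines", res.1),
   ("comment_lines", res.2.1),
   ("empty_lines", res.2.2)]

-- ===== PRECONDITION & SPEC =====
def Spec_calculate_quality_metrics_regex_py (content : String) (out : List (String × Int)) : Prop := out = calculate_quality_metrics_regex_py_alt content
instance (content : String) (out : List (String × Int)) : Decidable (Spec_calculate_quality_metrics_regex_py content out) := by unfold Spec_calculate_quality_metrics_regex_py; infer_instance

-- ===== CLAIM (what is proved, stated in full; the proofs are below) =====
def Claim_equal_calculate_quality_metrics_regex_py : Prop := ∀ (content : String), Dom_calculate_quality_metrics_regex_py content → Spec_calculate_quality_metrics_regex_py content (calculate_quality_metrics_regex_py content)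

-- ===== LEMMAS AND PROOFS =====
lemma pvAltLoop_eq (lines : List String) (c cm e : Int) :
    pvAltLoop lines (c, cm, e) =
      (c + ((lines.filter (fun line =>
          !(PySem.Str.strip line == "") && !PySem.Str.startswith (PySem.Str.strip line) "//")).length : Int),
       cm + ((lines.filter (fun line =>
          PySem.Str.startswith (PySem.Str.strip line) "//")).length : Int),
       e + ((lines.filter (fun line =>
          PySem.Str.strip line == "")).length : Int)) := by
  induction lines generalizing c cm e with
  | nil => simp [pvAltLoop]
  | cons l rest ih =>
    simp only [pvAltLoop, List.filter_cons]
    by_cases h1 : PySem.Str.strip l = ""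
    · simp only [h1, beq_self_eq_true, if_true, ih, List.length_cons]
      simp [Prod.ext_iff, PySem.Chars.startswith]
      omega
    · by_cases h2 : PySem.Str.startswith (PySem.Str.strip l) "//" = true
      · simp only [beq_iff_eq, h1, if_false, h2, if_true, ih, List.length_cons]
        simp [Prod.ext_iff]
        omega
      · simp only [beq_iff_eq, h1, if_false, h2, ih]
        simp [Prod.ext_iff, h1]
        omega

-- ===== VERDICT (by name: the statement is the Claim_ definition above) =====
theorem calculate_quality_metrics_regex_py_spec : Claim_equal_calculate_quality_metrics_regex_py := by
  intro content _
  unfold Spec_calculate_quality_metrics_regex_py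
  unfold calculate_quality_metrics_regex_py calculate_quality_metrics_regex_py_alt
  simp [pvAltLoop_eq]
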